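-- pv_equiv track=rewrite | github.com/azirella-ltd/Autonomy-TMS | backend/app/core/security.py | verify_password_strength
-- ===== SOURCE A (Python) =====
-- def verify_password_strength(password: str) -> bool:
--     """Verify that a password meets strength requirements.
--
--     Args:
--         password: The password to check
--
--     Returns:
--         bool: True if password meets requirements, False otherwise
--     """
--     if len(password) < 8:
--         return False
--     if not any(c.isupper() for c in password):
--         return False
--     if not any(c.islower() for c in password):
--         return False
--     if not any(c.isdigit() for c in password):
--         return False
--     return True
-- ===== SOURCE B (Python) =====
-- def verify_password_strength(password: str) -> bool:
--     """Single pass maintaining three flags instead of three any() scans."""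
--     has_upper = False
--     has_lower = False
--     has_digit = False
--     for c in password:
--         if c.isupper():
--             has_upper = True
--         if c.islower():
--             has_lower = True
--         if c.isdigit():
--             has_digit = True
--     return len(password) >= 8 and has_upper and has_lower and has_digit
-- ===== Notes on version B (the rewrite author's own statement) =====
-- stated objective: alternative
-- what changed: Replaced the early-return chain with three separate any() scans by a single loop over the characters accumulating has_upper/has_lower/has_digit flags, combined with the length check at the end.
import Mathlib
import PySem

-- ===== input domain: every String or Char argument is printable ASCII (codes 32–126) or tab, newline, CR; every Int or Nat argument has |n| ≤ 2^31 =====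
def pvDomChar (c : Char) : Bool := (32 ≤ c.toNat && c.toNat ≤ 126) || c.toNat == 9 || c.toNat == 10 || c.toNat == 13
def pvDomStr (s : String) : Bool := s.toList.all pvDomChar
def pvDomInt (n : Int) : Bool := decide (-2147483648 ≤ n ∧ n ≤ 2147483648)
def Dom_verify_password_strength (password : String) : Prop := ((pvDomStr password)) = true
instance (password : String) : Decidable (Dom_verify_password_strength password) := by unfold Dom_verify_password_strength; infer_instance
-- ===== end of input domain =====

-- B replaces A's three separate any() scans (early-return chain) by a single fold over the
-- characters accumulating three flags; alternative decomposition, same cost.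


-- ===== PORT A =====
def verify_password_strength (password : String) : Bool :=
  if PySem.Str.len password < 8 then false
  else if !(password.toList.any PySem.Chars.isupper) then false
  else if !(password.toList.any PySem.Chars.islower) then false
  else if !(password.toList.any PySem.Chars.isdigit) then false
  else true

-- ===== PORT B =====
def verify_password_strength_alt (password : String) : Bool :=
  let st := password.toList.foldl
    (fun (s : Bool × Bool × Bool) c =>
      ((if PySem.Chars.isupper c then true else s.1),
       (if PySem.Chars.islower c then true else s.2.1),
       (if PySem.Chars.isdigit c then true else s.2.2)))
    (false, false, false)
  decide (8 ≤ PySem.Str.len password) && st.1 && st.2.1 && st.2.2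

-- ===== PRECONDITION & SPEC =====
def Spec_verify_password_strength (password : String) (out : Bool) : Prop := out = verify_password_strength_alt password
instance (password : String) (out : Bool) : Decidable (Spec_verify_password_strength password out) := by unfold Spec_verify_password_strength; infer_instance

-- ===== CLAIM (what is proved, stated in full; the proofs are below) =====
def Claim_equal_verify_password_strength : Prop := ∀ (password : String), Dom_verify_password_strength password → Spec_verify_password_strength password (verify_password_strength password)

-- ===== LEMMAS AND PROOFS =====
theorem pv_fold_flags (l : List Char) (a b c : Bool) :
    l.foldl (fun (s : Bool × Bool × Bool) ch =>
      ((if PySem.Chars.isupper ch then true else s.1),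
       (if PySem.Chars.islower ch then true else s.2.1),
       (if PySem.Chars.isdigit ch then true else s.2.2))) (a, b, c)
    = (a || l.any PySem.Chars.isupper, b || l.any PySem.Chars.islower, c || l.any PySem.Chars.isdigit) := by
  induction l generalizing a b c with
  | nil => simp
  | cons x xs ih =>
      simp only [List.foldl, List.any_cons, ih]
      by_cases hu : PySem.Chars.isupper x <;> by_cases hl : PySem.Chars.islower x <;>
        by_cases hd : PySem.Chars.isdigit x <;> simp [hu, hl, hd]

-- ===== VERDICT (by name: the statement is the Claim_ definition above) =====
theorem verify_password_strength_spec : Claim_equal_verify_password_strength := by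
  intro password _
  unfold Spec_verify_password_strength verify_password_strength verify_password_strength_alt
  rw [pv_fold_flags]
  simp only [Bool.false_or]
  split_ifs with h1 h2 h3 h4 <;> simp_all
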